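-- pv_equiv track=rewrite | github.com/diogenespn/validador_cnab | app.py | validar_nosso_numero_duplicado_titulos
-- ===== SOURCE A (Python) =====
-- def validar_nosso_numero_duplicado_titulos(titulos):
--     """
--     Procura títulos com o mesmo Nosso Número na lista de títulos já extraída
--     (resultado de listar_titulos_cnab240).
--     Retorna uma lista de avisos em texto.
--     """
--     avisos = []
--     vistos = {}  # chave = Nosso Número, valor = primeiro título onde apareceu
--
--     for t in titulos:
--         nn = (t.get("nosso_numero") or "").strip()
--         if not nn:
--             continue
--
--         chave = nn
--
--         if chave in vistos:
--             primeiro = vistos[chave]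
--             avisos.append(
--                 (
--                     "Títulos com o mesmo Nosso Número '{nn}': primeiro em "
--                     "Lote {lote1}, Seq {seq1}; depois em Lote {lote2}, Seq {seq2}."
--                 ).format(
--                     nn=nn,
--                     lote1=primeiro.get("lote"),
--                     seq1=primeiro.get("sequencia"),
--                     lote2=t.get("lote"),
--                     seq2=t.get("sequencia"),
--                 )
--             )
--         else:
--             vistos[chave] = t
--
--     return avisos
-- ===== SOURCE B (Python) =====
-- def validar_nosso_numero_duplicado_titulos(titulos):
--     # Pass 1: map each non-empty stripped Nosso Numero to the index of its first occurrence.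
--     primeiro_idx = {}
--     for i, t in enumerate(titulos):
--         nn = (t.get("nosso_numero") or "").strip()
--         if nn and nn not in primeiro_idx:
--             primeiro_idx[nn] = i
--     # Pass 2: report every later occurrence against the first one.
--     avisos = []
--     for i, t in enumerate(titulos):
--         nn = (t.get("nosso_numero") or "").strip()
--         if not nn:
--             continue
--         j = primeiro_idx[nn]
--         if j != i:
--             primeiro = titulos[j]
--             avisos.append(
--                 "Títulos com o mesmo Nosso Número '{nn}': primeiro em "
--                 "Lote {lote1}, Seq {seq1}; depois em Lote {lote2}, Seq {seq2}.".format(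
--                     nn=nn,
--                     lote1=primeiro.get("lote"),
--                     seq1=primeiro.get("sequencia"),
--                     lote2=t.get("lote"),
--                     seq2=t.get("sequencia"),
--                 )
--             )
--     return avisos
-- ===== Notes on version B (the rewrite author's own statement) =====
-- stated objective: alternative
-- what changed: Replaced A's single membership-branching pass that stores first title objects in a dict with two passes: one pass builds a dict from each non-empty stripped nosso_numero to its first index, a second enumerate pass reports every title whose first index differs from its own position.
import Mathlib
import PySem

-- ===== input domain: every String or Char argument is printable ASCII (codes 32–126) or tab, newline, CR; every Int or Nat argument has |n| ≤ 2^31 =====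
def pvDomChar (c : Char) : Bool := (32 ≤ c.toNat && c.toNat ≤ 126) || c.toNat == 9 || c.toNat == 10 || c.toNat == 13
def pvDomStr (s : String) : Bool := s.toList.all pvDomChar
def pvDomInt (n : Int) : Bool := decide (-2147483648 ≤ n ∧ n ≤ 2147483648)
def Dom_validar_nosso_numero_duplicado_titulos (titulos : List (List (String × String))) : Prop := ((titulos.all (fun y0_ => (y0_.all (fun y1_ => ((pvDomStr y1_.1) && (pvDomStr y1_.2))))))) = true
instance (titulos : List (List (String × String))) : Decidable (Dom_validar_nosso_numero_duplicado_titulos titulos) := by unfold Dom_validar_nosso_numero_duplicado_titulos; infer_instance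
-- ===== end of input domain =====

-- B separates index-building from reporting: pass 1 records each Nosso Número's first index, pass 2 reports later occurrences (alternative decomposition, same cost).


-- shared helpers (both Pythons compute the same key and format the same message text)
-- nn = (t.get("nosso_numero") or "").strip()
def pvNN (t : List (String × String)) : String :=
  PySem.Str.strip ((PySem.Dict.mk t).getD "nosso_numero" "")

-- str(t.get(k)) as interpolated by .format: a missing key prints as "None"
def pvOptStr (o : Option String) : String :=
  match o with
  | none => "None"
  | some s => s

def pvAviso (nn : String) (primeiro t : List (String × String)) : String :=
  "Títulos com o mesmo Nosso Número '" ++ nn ++ "': primeiro em Lote " ++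
    pvOptStr ((PySem.Dict.mk primeiro).get? "lote") ++ ", Seq " ++
    pvOptStr ((PySem.Dict.mk primeiro).get? "sequencia") ++ "; depois em Lote " ++
    pvOptStr ((PySem.Dict.mk t).get? "lote") ++ ", Seq " ++
    pvOptStr ((PySem.Dict.mk t).get? "sequencia") ++ "."

-- ===== PORT A =====
-- A's single loop: vistos maps each seen key to the FIRST title carrying it
def pvALoop (vistos : PySem.Dict String (List (String × String))) :
    List (List (String × String)) → List String
  | [] => []
  | t :: rest =>
    let nn := pvNN t
    if nn = "" then pvALoop vistos rest
    else
      match vistos.get? nn with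
      | some primeiro => pvAviso nn primeiro t :: pvALoop vistos rest
      | none => pvALoop (vistos.insert nn t) rest

def validar_nosso_numero_duplicado_titulos (titulos : List (List (String × String))) : List String :=
  pvALoop PySem.Dict.empty titulos

-- ===== PORT B =====
-- pass 1: dict key -> index of its first occurrence
def pvFirstPass (d : PySem.Dict String Nat) (i : Nat) :
    List (List (String × String)) → PySem.Dict String Nat
  | [] => d
  | t :: rest =>
    let nn := pvNN t
    pvFirstPass (if nn ≠ "" ∧ (d.get? nn).isNone then d.insert nn i else d) (i + 1) rest

-- pass 2: for i, t in enumerate(titulos): report if first[nn] != i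
def pvSecondPass (full : List (List (String × String))) (first : PySem.Dict String Nat)
    (i : Nat) : List (List (String × String)) → List String
  | [] => []
  | t :: rest =>
    let nn := pvNN t
    if nn = "" then pvSecondPass full first (i + 1) rest
    else
      match first.get? nn with
      | some j =>
        if j ≠ i then pvAviso nn (full.getD j []) t :: pvSecondPass full first (i + 1) rest
        else pvSecondPass full first (i + 1) rest
      | none => pvSecondPass full first (i + 1) rest

def validar_nosso_numero_duplicado_titulos_alt (titulos : List (List (String × String))) : List String :=
  pvSecondPass titulos (pvFirstPass PySem.Dict.empty 0 titulos) 0 titulos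

-- ===== PRECONDITION & SPEC =====
def Spec_validar_nosso_numero_duplicado_titulos (titulos : List (List (String × String))) (out : List String) : Prop := out = validar_nosso_numero_duplicado_titulos_alt titulos
instance (titulos : List (List (String × String))) (out : List String) : Decidable (Spec_validar_nosso_numero_duplicado_titulos titulos out) := by unfold Spec_validar_nosso_numero_duplicado_titulos; infer_instance

-- ===== CLAIM (what is proved, stated in full; the proofs are below) =====
def Claim_equal_validar_nosso_numero_duplicado_titulos : Prop := ∀ (titulos : List (List (String × String))), Dom_validar_nosso_numero_duplicado_titulos titulos → Spec_validar_nosso_numero_duplicado_titulos titulos (validar_nosso_numero_duplicado_titulos titulos)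

-- ===== LEMMAS AND PROOFS =====

-- If the key is already present, pvFirstPass never changes its binding.
theorem pvFirstPass_get?_of_isSome (l : List (List (String × String)))
    (d : PySem.Dict String Nat) (k : Nat) (nn : String)
    (h : (d.get? nn).isSome) : (pvFirstPass d k l).get? nn = d.get? nn := by
  induction l generalizing d k with
  | nil => rfl
  | cons t rest ih =>
    simp only [pvFirstPass]
    by_cases hc : pvNN t ≠ "" ∧ ((d.get? (pvNN t)).isNone)
    · rw [if_pos hc]
      have hne : nn ≠ pvNN t := by
        intro he
        rw [← he] at hc
        cases hs : d.get? nn with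
        | none => rw [hs] at h; simp at h
        | some v => rw [hs] at hc; simp at hc
      rw [ih _ _ (by rw [PySem.Dict.get?_insert, if_neg hne]; exact h)]
      rw [PySem.Dict.get?_insert, if_neg hne]
    · rw [if_neg hc]
      exact ih _ _ h

-- Completeness: a key occurring at relative position m gets an index ≤ k + m.
theorem pvFirstPass_le (l : List (List (String × String)))
    (d : PySem.Dict String Nat) (k m : Nat) (nn : String) (hnn : nn ≠ "")
    (hd : d.get? nn = none) (hm : m < l.length) (hk : pvNN (l.getD m []) = nn) :
    ∃ j, j ≤ k + m ∧ (pvFirstPass d k l).get? nn = some j := by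
  induction l generalizing d k m with
  | nil => simp at hm
  | cons t rest ih =>
    simp only [pvFirstPass]
    by_cases ht : pvNN t = nn
    · refine ⟨k, by omega, ?_⟩
      have hg : pvNN t ≠ "" ∧ ((d.get? (pvNN t)).isNone) := by
        rw [ht]; exact ⟨hnn, by simp [hd]⟩
      rw [if_pos hg]
      rw [pvFirstPass_get?_of_isSome _ _ _ _ (by rw [ht, PySem.Dict.get?_insert, if_pos rfl]; simp)]
      rw [ht, PySem.Dict.get?_insert, if_pos rfl]
    · cases m with
      | zero => simp at hk; exact absurd hk ht
      | succ m' =>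
        have hd' : (if pvNN t ≠ "" ∧ (d.get? (pvNN t)).isNone then d.insert (pvNN t) k else d).get? nn = none := by
          split
          · rw [PySem.Dict.get?_insert, if_neg (fun h => ht h.symm)]; exact hd
          · exact hd
        obtain ⟨j, hj, hget⟩ := ih _ (k + 1) m' hd' (by simpa using hm) (by simpa using hk)
        exact ⟨j, by omega, hget⟩

-- Soundness: every recorded index points at an element of the list with that key.
theorem pvFirstPass_sound (l : List (List (String × String)))
    (d : PySem.Dict String Nat) (k : Nat) (nn : String) (j : Nat)
    (h : (pvFirstPass d k l).get? nn = some j) :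
    d.get? nn = some j ∨ ∃ m, m < l.length ∧ j = k + m ∧ pvNN (l.getD m []) = nn := by
  induction l generalizing d k with
  | nil => exact Or.inl h
  | cons t rest ih =>
    simp only [pvFirstPass] at h
    rcases ih _ _ h with hd | ⟨m, hm, hj, hk⟩
    · by_cases hc : pvNN t ≠ "" ∧ (d.get? (pvNN t)).isNone
      · rw [if_pos hc, PySem.Dict.get?_insert] at hd
        by_cases he : nn = pvNN t
        · rw [if_pos he] at hd
          exact Or.inr ⟨0, by simp, by have := Option.some.inj hd; omega, by simpa [List.getD] using he.symm⟩
        · rw [if_neg he] at hd; exact Or.inl hd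
      · rw [if_neg hc] at hd; exact Or.inl hd
    · exact Or.inr ⟨m + 1, by simpa using hm, by omega, by simpa using hk⟩

-- The invariant tying A's vistos (key -> first TITLE) to B's first-index dict at boundary i.
def pvInv (full : List (List (String × String))) (first : PySem.Dict String Nat)
    (vistos : PySem.Dict String (List (String × String))) (i : Nat) : Prop :=
  ∀ nn, nn ≠ "" →
    ((∀ prim, vistos.get? nn = some prim →
        ∃ j, j < i ∧ first.get? nn = some j ∧ full.getD j [] = prim) ∧
     (vistos.get? nn = none → ∀ j, first.get? nn = some j → i ≤ j))

-- Main induction: with the invariant, A's remaining loop equals B's remaining second pass.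
theorem pvMain (s full : List (List (String × String)))
    (vistos : PySem.Dict String (List (String × String))) (i : Nat)
    (hdrop : full.drop i = s)
    (hinv : pvInv full (pvFirstPass PySem.Dict.empty 0 full) vistos i) :
    pvALoop vistos s = pvSecondPass full (pvFirstPass PySem.Dict.empty 0 full) i s := by
  induction s generalizing vistos i with
  | nil => rfl
  | cons t rest ih =>
    have hlen : i < full.length := by
      by_contra h
      rw [List.drop_eq_nil_of_le (by omega)] at hdrop
      exact absurd hdrop (by simp)
    have hget : full.getD i [] = t := by
      have h0 : (full.drop i)[0]? = full[i + 0]? := List.getElem?_drop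
      rw [hdrop] at h0
      simp at h0
      simp [List.getD, ← h0]
    have hdrop' : full.drop (i + 1) = rest := by
      have : full.drop (i + 1) = (full.drop i).drop 1 := by rw [List.drop_drop]
      rw [this, hdrop]; rfl
    simp only [pvALoop, pvSecondPass]
    by_cases hnn : pvNN t = ""
    · rw [if_pos hnn, if_pos hnn]
      refine ih _ (i + 1) hdrop' ?_
      intro nn h
      obtain ⟨h1, h2⟩ := hinv nn h
      refine ⟨fun prim hp => ?_, fun hn j hj => ?_⟩
      · obtain ⟨j, hj, hg, hv⟩ := h1 prim hp
        exact ⟨j, by omega, hg, hv⟩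
      · have hi := h2 hn j hj
        rcases pvFirstPass_sound full _ _ _ _ hj with hc | ⟨m, _, hm, hk⟩
        · rw [PySem.Dict.get?_empty] at hc; exact absurd hc (by simp)
        · have : j ≠ i := by
            intro he
            have : m = i := by omega
            rw [this, hget] at hk
            exact h (hk ▸ hnn)
          omega
    · rw [if_neg hnn, if_neg hnn]
      obtain ⟨h1, h2⟩ := hinv (pvNN t) hnn
      cases hv : vistos.get? (pvNN t) with
      | some primeiro =>
        obtain ⟨j, hj, hg, hfull⟩ := h1 primeiro hv
        rw [hg]
        dsimp only
        rw [if_pos (by omega : j ≠ i), hfull]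
        congr 1
        refine ih _ (i + 1) hdrop' ?_
        intro nn h
        obtain ⟨g1, g2⟩ := hinv nn h
        refine ⟨fun prim hp => ?_, fun hn j' hj' => ?_⟩
        · obtain ⟨j', hj', hg', hv'⟩ := g1 prim hp
          exact ⟨j', by omega, hg', hv'⟩
        · have hi := g2 hn j' hj'
          have : j' ≠ i := by
            intro he
            rcases pvFirstPass_sound full _ _ _ _ hj' with hc | ⟨m, _, hm, hk⟩
            · rw [PySem.Dict.get?_empty] at hc; exact absurd hc (by simp)
            · have : m = i := by omega
              rw [this, hget] at hk
              -- position i has key pvNN t, which is in vistos; nn is not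
              have : nn = pvNN t := hk.symm
              rw [this, hv] at hn
              exact absurd hn (by simp)
          omega
      | none =>
        obtain ⟨j, hjle, hg⟩ :=
          pvFirstPass_le full PySem.Dict.empty 0 i (pvNN t) hnn
            (PySem.Dict.get?_empty _) hlen (by rw [hget])
        have hji : i ≤ j := h2 hv j hg
        have hj : j = i := by omega
        rw [hg, hj]
        dsimp only
        rw [if_neg (by simp)]
        refine ih _ (i + 1) hdrop' ?_
        intro nn h
        refine ⟨fun prim hp => ?_, fun hn j' hj' => ?_⟩
        · rw [PySem.Dict.get?_insert] at hp
          by_cases he : nn = pvNN t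
          · rw [if_pos he] at hp
            refine ⟨i, by omega, ?_, ?_⟩
            · rw [he]; exact hj ▸ hg
            · rw [hget]; exact Option.some.inj hp
          · rw [if_neg he] at hp
            obtain ⟨g1, _⟩ := hinv nn h
            obtain ⟨j', hj', hg', hv'⟩ := g1 prim hp
            exact ⟨j', by omega, hg', hv'⟩
        · rw [PySem.Dict.get?_insert] at hn
          by_cases he : nn = pvNN t
          · rw [if_pos he] at hn; exact absurd hn (by simp)
          · rw [if_neg he] at hn
            obtain ⟨_, g2⟩ := hinv nn h
            have hi := g2 hn j' hj'
            have : j' ≠ i := by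
              intro heq
              rcases pvFirstPass_sound full _ _ _ _ hj' with hc | ⟨m, _, hm, hk⟩
              · rw [PySem.Dict.get?_empty] at hc; exact absurd hc (by simp)
              · have : m = i := by omega
                rw [this, hget] at hk
                exact he hk.symm
            omega

-- ===== VERDICT (by name: the statement is the Claim_ definition above) =====
theorem validar_nosso_numero_duplicado_titulos_spec : Claim_equal_validar_nosso_numero_duplicado_titulos := by
  intro titulos _
  unfold Spec_validar_nosso_numero_duplicado_titulos
  unfold validar_nosso_numero_duplicado_titulos validar_nosso_numero_duplicado_titulos_alt
  refine pvMain titulos titulos PySem.Dict.empty 0 (by simp) ?_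
  intro nn _
  constructor
  · intro prim hp
    rw [PySem.Dict.get?_empty] at hp
    exact absurd hp (by simp)
  · intro _ j _
    omega
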